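-- pv_equiv track=rewrite | github.com/yihanchen3/Quora-Insincere-Questions-Classification | preprocessing.py | clean_text
-- ===== SOURCE A (Python) =====
-- def clean_text(x):
--
--     x = str(x)
--     for punct in "/-'":
--         x = x.replace(punct, ' ')
--     for punct in '&':
--         x = x.replace(punct, f' {punct} ')
--     for punct in '?!.,"#$%\'()*+-/:;<=>@[\\]^_`{|}~' + '“”’':
--         x = x.replace(punct, '')
--     return x
-- ===== SOURCE B (Python) =====
-- def clean_text(x):
--     x = str(x)
--     table = {ord(c): None for c in '?!.,"#$%\'()*+-/:;<=>@[\\]^_`{|}~' + '“”’'}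
--     for c in "/-'":
--         table[ord(c)] = ' '
--     table[ord('&')] = ' & '
--     return x.translate(table)
-- ===== Notes on version B (the rewrite author's own statement) =====
-- stated objective: idiomatic
-- what changed: Replaces A's three sequential loops of multi-pass str.replace (one full scan per punctuation character) by building one translation table once and doing a single left-to-right str.translate pass over the string.
import Mathlib
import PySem

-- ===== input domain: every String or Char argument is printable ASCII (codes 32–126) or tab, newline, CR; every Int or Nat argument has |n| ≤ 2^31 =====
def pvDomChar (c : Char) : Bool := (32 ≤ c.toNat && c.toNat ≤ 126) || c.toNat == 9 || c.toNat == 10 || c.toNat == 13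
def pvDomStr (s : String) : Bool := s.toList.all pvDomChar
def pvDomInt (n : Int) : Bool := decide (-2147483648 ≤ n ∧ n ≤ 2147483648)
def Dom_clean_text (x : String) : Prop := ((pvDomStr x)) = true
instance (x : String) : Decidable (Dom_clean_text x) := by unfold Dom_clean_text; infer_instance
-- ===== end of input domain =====

-- B replaces A's three multi-pass str.replace loops by one translation table built once
-- and a single left-to-right pass over the string (idiomatic str.translate).

-- ===== PORT A =====
-- A's three loops, each a fold of single-character str.replace over the loop string.
def clean_text (x : String) : String :=
  let x := x  -- str(x) on a str is the identity
  let x := "/-'".toList.foldl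
    (fun s p => PySem.Str.replace s (String.ofList [p]) " ") x
  let x := "&".toList.foldl
    (fun s p => PySem.Str.replace s (String.ofList [p]) (String.ofList ([' '] ++ [p] ++ [' ']))) x
  let x := "?!.,\"#$%'()*+-/:;<=>@[\\]^_`{|}~“”’".toList.foldl
    (fun s p => PySem.Str.replace s (String.ofList [p]) "") x
  x

-- ===== PORT B =====
-- B's table: Char stands for the Python ordinal ord(c) (a bijection); value none = delete.
def cleanTable : PySem.Dict Char (Option String) :=
  let t := "?!.,\"#$%'()*+-/:;<=>@[\\]^_`{|}~“”’".toList.foldl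
    (fun d c => d.insert c none) PySem.Dict.empty
  let t := "/-'".toList.foldl (fun d c => d.insert c (some " ")) t
  t.insert '&' (some " & ")

-- str.translate's per-character rule: untabled chars kept, none deletes, a string is spliced in.
def pyTranslate (c : Char) : List Char :=
  match cleanTable.get? c with
  | none => [c]
  | some none => []
  | some (some r) => r.toList

-- str.translate: one left-to-right pass applying the table.
def clean_text_alt (x : String) : String :=
  String.ofList (x.toList.flatMap pyTranslate)

-- ===== PRECONDITION & SPEC =====
def Spec_clean_text (x : String) (out : String) : Prop := out = clean_text_alt x
instance (x : String) (out : String) : Decidable (Spec_clean_text x out) := by unfold Spec_clean_text; infer_instance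

-- ===== CLAIM (what is proved, stated in full; the proofs are below) =====
def Claim_equal_clean_text : Prop := ∀ (x : String), Dom_clean_text x → Spec_clean_text x (clean_text x)

-- ===== LEMMAS AND PROOFS =====

-- per-char effect of one single-character replace
def sub1 (p : Char) (new : List Char) (c : Char) : List Char := if c = p then new else [c]

theorem replace_go_single (p : Char) (new : List Char) :
    ∀ (fuel : Nat) (l acc : List Char), l.length ≤ fuel →
      PySem.Chars.replace.go [p] new fuel l acc = acc.reverse ++ l.flatMap (sub1 p new) := by
  intro fuel
  induction fuel with
  | zero =>
    intro l acc h
    have : l = [] := List.length_eq_zero_iff.mp (Nat.le_zero.mp h)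
    subst this
    simp [PySem.Chars.replace.go]
  | succ n ih =>
    intro l acc h
    cases l with
    | nil => simp [PySem.Chars.replace.go]
    | cons c t =>
      simp only [PySem.Chars.replace.go]
      by_cases hc : c = p
      · subst hc
        have hpre : List.isPrefixOf [c] (c :: t) = true := by
          simp [List.isPrefixOf]
        simp only [hpre, if_pos]
        have hdrop : List.drop [c].length (c :: t) = t := rfl
        rw [hdrop, ih t (new.reverse ++ acc) (by simpa using Nat.lt_succ_iff.mp (by simpa using h))]
        simp [sub1]
      · have hpre : List.isPrefixOf [p] (c :: t) = false := by
          simp [List.isPrefixOf, Ne.symm hc]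
        simp only [hpre]
        rw [ih t (c :: acc) (by simpa using Nat.lt_succ_iff.mp (by simpa using h))]
        simp [sub1, hc]

theorem replace_single (l : List Char) (p : Char) (new : List Char) :
    PySem.Chars.replace l [p] new = l.flatMap (sub1 p new) := by
  have := replace_go_single p new l.length l [] (le_refl _)
  simpa [PySem.Chars.replace] using this

-- per-char effect of a fold of single-character replaces
def subAll (ps : List Char) (nw : Char → List Char) (c : Char) : List Char :=
  match ps with
  | [] => [c]
  | p :: ps' => (sub1 p (nw p) c).flatMap (subAll ps' nw)

theorem foldl_replace (ps : List Char) (nw : Char → List Char) (l : List Char) :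
    ps.foldl (fun s p => PySem.Chars.replace s [p] (nw p)) l = l.flatMap (subAll ps nw) := by
  induction ps generalizing l with
  | nil => simp [subAll]
  | cons p ps' ih =>
    simp only [List.foldl_cons]
    rw [ih, replace_single, List.flatMap_assoc]
    rfl

-- the String-level fold of A maps to the Chars-level fold
theorem foldl_replace_str (ps : List Char) (nwS : Char → String) (s : String) :
    (ps.foldl (fun s p => PySem.Str.replace s (String.ofList [p]) (nwS p)) s).toList
      = ps.foldl (fun l p => PySem.Chars.replace l [p] (nwS p).toList) s.toList := by
  induction ps generalizing s with
  | nil => simp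
  | cons p ps' ih =>
    simp only [List.foldl_cons]
    rw [ih, PySem.Str.toList_replace, String.toList_ofList]

-- the combined per-char function of A's three loops
def fA (c : Char) : List Char :=
  (subAll "/-'".toList (fun _ => " ".toList) c).flatMap (fun d =>
    (subAll "&".toList (fun p => [' ', p, ' ']) d).flatMap
      (subAll "?!.,\"#$%'()*+-/:;<=>@[\\]^_`{|}~“”’".toList (fun _ => "".toList)))

set_option maxRecDepth 40000 in
theorem perChar (c : Char) : fA c = pyTranslate c := by
  by_cases hc : c ∈ ['/', '-', '\'', '&', '?', '!', '.', ',', '"', '#', '$', '%', '(', ')', '*', '+', ':', ';', '<', '=', '>', '@', '[', '\\', ']', '^', '_', '`', '{', '|', '}', '~', '“', '”', '’']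
  · fin_cases hc <;> decide
  · simp only [List.mem_cons, List.not_mem_nil, or_false, not_or] at hc
    obtain ⟨h1, h2, h3, h4, h5, h6, h7, h8, h9, h10, h11, h12, h13, h14, h15, h16, h17, h18, h19, h20, h21, h22, h23, h24, h25, h26, h27, h28, h29, h30, h31, h32, h33, h34, h35⟩ := hc
    have e1 : "/-'".toList = ['/', '-', '\''] := by decide
    have e2 : "&".toList = ['&'] := by decide
    have e3 : "?!.,\"#$%'()*+-/:;<=>@[\\]^_`{|}~“”’".toList = ['?', '!', '.', ',', '"', '#', '$', '%', '\'', '(', ')', '*', '+', '-', '/', ':', ';', '<', '=', '>', '@', '[', '\\', ']', '^', '_', '`', '{', '|', '}', '~', '“', '”', '’'] := by decide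
    have e4 : " ".toList = [' '] := by decide
    have e5 : ("" : String).toList = [] := by decide
    have hkeys : cleanTable.keys = ['?', '!', '.', ',', '"', '#', '$', '%', '\'', '(', ')', '*', '+', '-', '/', ':', ';', '<', '=', '>', '@', '[', '\\', ']', '^', '_', '`', '{', '|', '}', '~', '“', '”', '’', '&'] := by decide
    have hget : cleanTable.get? c = none := by
      rw [PySem.Dict.get?_eq_none_iff_not_mem_keys, hkeys]
      simp only [List.mem_cons, List.not_mem_nil, or_false, not_or]
      exact ⟨h5, h6, h7, h8, h9, h10, h11, h12, h3, h13, h14, h15, h16, h2, h1, h17, h18, h19, h20, h21, h22, h23, h24, h25, h26, h27, h28, h29, h30, h31, h32, h33, h34, h35, h4⟩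
    have hfB : pyTranslate c = [c] := by unfold pyTranslate; rw [hget]
    rw [hfB]
    simp only [fA, e1, e2, e3, e4, e5]
    simp [subAll, sub1, h1, h2, h3, h4, h5, h6, h7, h8, h9, h10, h11, h12, h13, h14, h15, h16, h17, h18, h19, h20, h21, h22, h23, h24, h25, h26, h27, h28, h29, h30, h31, h32, h33, h34, h35]
theorem clean_text_toList (x : String) :
    (clean_text x).toList = x.toList.flatMap fA := by
  simp only [clean_text]
  rw [foldl_replace_str, foldl_replace_str, foldl_replace_str]
  rw [foldl_replace]
  have h2 : ∀ l : List Char,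
      ("&".toList.foldl (fun l p => PySem.Chars.replace l [p] (String.ofList ([' '] ++ [p] ++ [' '])).toList) l)
        = l.flatMap (subAll "&".toList (fun p => [' ', p, ' '])) := by
    intro l
    have := foldl_replace "&".toList (fun p => [' ', p, ' ']) l
    simpa using this
  rw [h2, foldl_replace]
  simp only [List.flatMap_assoc]
  rfl

-- ===== VERDICT (by name: the statement is the Claim_ definition above) =====
theorem clean_text_spec : Claim_equal_clean_text := by
  intro x _
  unfold Spec_clean_text clean_text_alt
  apply String.toList_inj.mp
  rw [String.toList_ofList, clean_text_toList, show fA = pyTranslate from funext perChar]
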